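/- GENERATED by c/gen_decode.py: decode facts of the image, one per distinct instruction byte string. -/
import UserX.DecodeImage

#decode_all ProgX.Base.Dec
  "4154"  -- push r12
  "4839f0"  -- cmp rax,rsi
  "4889342558f01f00"  -- mov QWORD PTR ds:0x1ff058,rsi
  "488b08"  -- mov rcx,QWORD PTR [rax]
  "48c7042528f01f0002000000"  -- mov QWORD PTR ds:0x1ff028,0x2
  "49d1ed"  -- shr r13,1
  "5d"  -- pop rbp
  "660fefdb"  -- pxor xmm3,xmm3
  "741e"  -- je 103823
  "772b"  -- ja 102d11
  "83f802"  -- cmp eax,0x2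
  "be04000000"  -- mov esi,0x4
  "e872f7ffff"  -- call 100200
  "e8dbecffff"  -- call 100300
  "eb33"  -- jmp 101354
  "f20f101c24"  -- movsd xmm3,QWORD PTR [rsp]
  "f20f590525db0300"  -- mulsd xmm0,QWORD PTR [rip+0x3db25]
  "f20f5cd1"  -- subsd xmm2,xmm1
  "f2480f2ac8"  -- cvtsi2sd xmm1,rax
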